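-- pv_equiv track=rewrite | github.com/Zombiesama18/Leetcode_Python | Leetcode/Leetcode_招商银行-02. 公园规划.py | numFlowers
-- ===== SOURCE A (Python) =====
-- import collections
-- from typing import List
--
-- def numFlowers(roads: List[List[int]]) -> int:
--     graph = collections.defaultdict(set)
--     for road in roads:
--         graph[road[0]].add(road[1])
--     for node in graph:
--         if node > 1:
--             graph[node].add(node - 2)
--         if node < len(roads) - 2:
--             graph[node].add(node + 2)
--     return max(len(value) + 1 for value in graph.values())
-- ===== SOURCE B (Python) =====
-- def numFlowers(roads):
--     # Flat edge list instead of a dict of sets: collect every (source, target)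
--     # pair (including the augmented node-2 / node+2 neighbours) into one set,
--     # sort it by source, and take the longest run of equal sources in one scan.
--     n = len(roads)
--     pairs = set()
--     for r in roads:
--         u = r[0]
--         pairs.add((u, r[1]))
--         if u > 1:
--             pairs.add((u, u - 2))
--         if u < n - 2:
--             pairs.add((u, u + 2))
--     best = run = 0
--     prev = None
--     for u, v in sorted(pairs, key=lambda e: e[0]):
--         run = run + 1 if prev == u else 1
--         prev = u
--         best = max(best, run)
--     return best + 1
-- ===== Notes on version B (the rewrite author's own statement) =====
-- stated objective: alternative
-- what changed: The dict-of-sets grouping and its second set-mutating pass are replaced by a flat set of (source,target) edge pairs (augmented pairs added per road) that is sorted by source and scanned once for the longest run of equal sources; no per-key container or dict is used.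
import Mathlib
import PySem

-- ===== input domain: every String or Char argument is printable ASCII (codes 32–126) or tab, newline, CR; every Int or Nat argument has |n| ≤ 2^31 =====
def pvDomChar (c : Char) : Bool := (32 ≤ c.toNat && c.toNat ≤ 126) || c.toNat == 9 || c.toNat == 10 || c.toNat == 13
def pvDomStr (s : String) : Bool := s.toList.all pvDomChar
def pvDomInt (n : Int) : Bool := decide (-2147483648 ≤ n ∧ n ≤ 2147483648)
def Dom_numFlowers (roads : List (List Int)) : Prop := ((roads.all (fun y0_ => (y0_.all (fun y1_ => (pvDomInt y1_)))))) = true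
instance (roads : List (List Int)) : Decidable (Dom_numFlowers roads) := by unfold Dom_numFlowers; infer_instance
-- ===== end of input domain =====

-- B replaces A's dict-of-sets grouping and set-mutating second pass by a flat set of
-- (source,target) edge pairs sorted by source and a single longest-run scan; return values agree.

-- ===== PORT A =====
-- graph[road[0]].add(road[1])  (defaultdict(set): modify with default empty set)
def pvBuildStepA (d : PySem.Dict Int (PySem.Set Int)) (road : List Int) : PySem.Dict Int (PySem.Set Int) :=
  d.modify (PySem.List.pyGetD road 0 0) [] (fun s => PySem.Set.add s (PySem.List.pyGetD road 1 0))

-- body of A's second loop: if node > 1: add node-2; if node < len(roads)-2: add node+2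
def pvAugStep (n : Int) (d : PySem.Dict Int (PySem.Set Int)) (node : Int) : PySem.Dict Int (PySem.Set Int) :=
  let d1 := if node > 1 then d.modify node [] (fun s => PySem.Set.add s (node - 2)) else d
  if node < n - 2 then d1.modify node [] (fun s => PySem.Set.add s (node + 2)) else d1

def numFlowers (roads : List (List Int)) : Int :=
  let graph := roads.foldl pvBuildStepA PySem.Dict.empty
  let graph2 := graph.keys.foldl (pvAugStep (roads.length : Int)) graph
  -- max(len(value) + 1 for value in graph.values()); empty roads (ValueError) is excluded by Pre_
  (PySem.List.max? (graph2.values.map (fun v => PySem.Set.len v + 1)) id).getD 0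

-- ===== PORT B =====
-- the collecting loop body: pairs.add((u, r[1])); conditional pairs.add((u, u±2))
def pvCollect (n : Int) (s : PySem.Set (Int × Int)) (r : List Int) : PySem.Set (Int × Int) :=
  let u := PySem.List.pyGetD r 0 0
  let s1 := PySem.Set.add s (u, PySem.List.pyGetD r 1 0)
  let s2 := if u > 1 then PySem.Set.add s1 (u, u - 2) else s1
  if u < n - 2 then PySem.Set.add s2 (u, u + 2) else s2

-- the scan loop: run = run + 1 if prev == u else 1; prev = u; best = max(best, run)
def pvScan : List (Int × Int) → Option Int → Int → Int → Int
  | [], _, _, best => best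
  | (u, _) :: rest, prev, run, best =>
    let run' := if prev = some u then run + 1 else 1
    pvScan rest (some u) run' (max best run')

-- sorted(pairs, key=lambda e: e[0]): ties within one source differ from CPython's set
-- iteration order, but the scan's value (longest run of equal sources) does not depend on them.
def numFlowers_alt (roads : List (List Int)) : Int :=
  let n : Int := roads.length
  let pairs := roads.foldl (pvCollect n) PySem.Set.empty
  pvScan (PySem.List.sorted pairs (fun e => e.1)) none 0 0 + 1

-- ===== PRECONDITION & SPEC =====
-- Pre_ excludes exactly the inputs where the Python A raises: empty roads (ValueError from max
-- of an empty sequence) and any road with fewer than two entries (IndexError on road[0]/road[1]).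
def Pre_numFlowers (roads : List (List Int)) : Prop :=
  roads ≠ [] ∧ ∀ road ∈ roads, 2 ≤ road.length
instance (roads : List (List Int)) : Decidable (Pre_numFlowers roads) := by
  unfold Pre_numFlowers; infer_instance

def pvWitness_numFlowers : List (List Int) := [[0, 1], [1, 2], [2, 0], [1, 0]]

def Spec_numFlowers (roads : List (List Int)) (out : Int) : Prop := out = numFlowers_alt roads
instance (roads : List (List Int)) (out : Int) : Decidable (Spec_numFlowers roads out) := by
  unfold Spec_numFlowers; infer_instance

-- ===== CLAIM (what is proved, stated in full; the proofs are below) =====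
def Claim_equal_numFlowers : Prop := ∀ (roads : List (List Int)), Dom_numFlowers roads → Pre_numFlowers roads → Spec_numFlowers roads (numFlowers roads)

-- ===== LEMMAS AND PROOFS =====

-- the value A's second loop leaves at key `node` when the stored set was s
def pvAugVal (n : Int) (node : Int) (s : PySem.Set Int) : PySem.Set Int :=
  let s1 := if node > 1 then PySem.Set.add s (node - 2) else s
  if node < n - 2 then PySem.Set.add s1 (node + 2) else s1

-- the edges B collects, as a predicate on (u, v)
def pvEdgeP (n : Int) (roads : List (List Int)) (u v : Int) : Prop :=
  ∃ r ∈ roads, u = PySem.List.pyGetD r 0 0 ∧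
    (v = PySem.List.pyGetD r 1 0
      ∨ (PySem.List.pyGetD r 0 0 > 1 ∧ v = PySem.List.pyGetD r 0 0 - 2)
      ∨ (PySem.List.pyGetD r 0 0 < n - 2 ∧ v = PySem.List.pyGetD r 0 0 + 2))

-- sup of a list of Ints against base 0 (the running max the proofs reason about)
def pvISup (xs : List Int) : Int := xs.foldl max 0

-- max-run value of B's scan once a previous key is fixed
def pvRunMax : List (Int × Int) → Int → Int → Int
  | [], _, _ => 0
  | (u, _) :: rest, k, r =>
    let r' := if u = k then r + 1 else 1
    max r' (pvRunMax rest u r')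

-- ---- A-side: the augmented dict, key set and per-key values ----

theorem augStep_getD_ne (n : Int) (d : PySem.Dict Int (PySem.Set Int)) (node k : Int)
    (h : k ≠ node) : (pvAugStep n d node).getD k [] = d.getD k [] := by
  unfold pvAugStep
  simp only []
  split_ifs <;> simp [PySem.Dict.getD_modify, h]

theorem augStep_getD_self (n : Int) (d : PySem.Dict Int (PySem.Set Int)) (node : Int) :
    (pvAugStep n d node).getD node [] = pvAugVal n node (d.getD node []) := by
  unfold pvAugStep pvAugVal
  split_ifs <;> simp

theorem augStep_keys (n : Int) (d : PySem.Dict Int (PySem.Set Int)) (node : Int)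
    (h : node ∈ d.keys) : (pvAugStep n d node).keys = d.keys := by
  unfold pvAugStep
  have hc : ∀ d' : PySem.Dict Int (PySem.Set Int), node ∈ d'.keys →
      ∀ f : PySem.Set Int → PySem.Set Int, (d'.modify node [] f).keys = d'.keys := by
    intro d' hm f
    rw [PySem.Dict.keys_modify, PySem.Dict.keys_insert_of_contains]
    exact (PySem.Dict.contains_iff_mem_keys d' node).mpr hm
  split_ifs with h1 h2 h2
  · show ((d.modify node [] _).modify node [] _).keys = d.keys
    rw [hc (d.modify node [] _) (by rw [hc d h _]; exact h) _, hc d h _]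
  · exact hc d h _
  · exact hc d h _
  · rfl

theorem augLoop_keys (n : Int) (l : List Int) (d : PySem.Dict Int (PySem.Set Int))
    (h : ∀ x ∈ l, x ∈ d.keys) : (l.foldl (pvAugStep n) d).keys = d.keys := by
  induction l generalizing d with
  | nil => rfl
  | cons x xs ih =>
    have hk := augStep_keys n d x (h x (by simp))
    simp only [List.foldl_cons]
    rw [ih (pvAugStep n d x) (fun y hy => by rw [hk]; exact h y (by simp [hy]))]
    exact hk

theorem augLoop_getD_notmem (n : Int) (l : List Int) (d : PySem.Dict Int (PySem.Set Int))
    (k : Int) (hk : k ∉ l) :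
    (l.foldl (pvAugStep n) d).getD k [] = d.getD k [] := by
  induction l generalizing d with
  | nil => rfl
  | cons x xs ih =>
    simp only [List.foldl_cons]
    rw [ih _ (fun h => hk (List.mem_cons_of_mem x h)),
      augStep_getD_ne n d x k (fun he => hk (he ▸ List.mem_cons_self))]

theorem augLoop_getD (n : Int) (l : List Int) (d : PySem.Dict Int (PySem.Set Int))
    (hnd : l.Nodup) (k : Int) (hk : k ∈ l) :
    (l.foldl (pvAugStep n) d).getD k [] = pvAugVal n k (d.getD k []) := by
  induction l generalizing d with
  | nil => cases hk
  | cons x xs ih =>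
    simp only [List.foldl_cons]
    rcases List.mem_cons.mp hk with rfl | hmem
    · rw [augLoop_getD_notmem n xs _ k (List.nodup_cons.mp hnd).1, augStep_getD_self]
    · rw [ih _ (List.nodup_cons.mp hnd).2 hmem,
        augStep_getD_ne n d x k (by intro he; exact (List.nodup_cons.mp hnd).1 (he ▸ hmem))]

-- what A's first loop stores at key u
theorem mem_build_getD (roads : List (List Int)) (d : PySem.Dict Int (PySem.Set Int))
    (u v : Int) :
    v ∈ (roads.foldl pvBuildStepA d).getD u [] ↔
      v ∈ d.getD u [] ∨ ∃ r ∈ roads,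
        u = PySem.List.pyGetD r 0 0 ∧ v = PySem.List.pyGetD r 1 0 := by
  induction roads generalizing d with
  | nil => simp
  | cons r rs ih =>
    simp only [List.foldl_cons, ih]
    have hstep : (pvBuildStepA d r).getD u [] =
        if u = PySem.List.pyGetD r 0 0
        then PySem.Set.add (d.getD u []) (PySem.List.pyGetD r 1 0)
        else d.getD u [] := by
      simp only [pvBuildStepA, PySem.Dict.getD_modify]
      split_ifs with h
      · rw [h]
      · rfl
    rw [hstep]
    simp only [List.mem_cons, exists_eq_or_imp]
    split_ifs with h
    · simp only [PySem.Set.mem_add, h]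
      tauto
    · tauto

theorem mem_build_keys (roads : List (List Int)) (u : Int) :
    u ∈ (roads.foldl pvBuildStepA PySem.Dict.empty).keys ↔
      ∃ r ∈ roads, u = PySem.List.pyGetD r 0 0 := by
  have h := PySem.Dict.keys_foldl_modify_key roads (fun road => PySem.List.pyGetD road 0 0)
    ([] : PySem.Set Int)
    (fun _ road => (fun s => PySem.Set.add s (PySem.List.pyGetD road 1 0))) PySem.Dict.empty
  show u ∈ (List.foldl (fun d x => d.modify (PySem.List.pyGetD x 0 0) []
    (fun s => PySem.Set.add s (PySem.List.pyGetD x 1 0))) PySem.Dict.empty roads).keys ↔ _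
  rw [h]
  rw [PySem.Set.mem_update]
  simp [PySem.Dict.keys_empty, eq_comm]

theorem nodup_build_getD (roads : List (List Int)) (d : PySem.Dict Int (PySem.Set Int))
    (hd : ∀ k : Int, (d.getD k []).Nodup) (u : Int) :
    ((roads.foldl pvBuildStepA d).getD u []).Nodup := by
  induction roads generalizing d with
  | nil => exact hd u
  | cons r rs ih =>
    simp only [List.foldl_cons]
    refine ih _ (fun k => ?_)
    simp only [pvBuildStepA, PySem.Dict.getD_modify]
    split_ifs
    · exact PySem.Set.nodup_add _ _ (hd _)
    · exact hd k

-- membership in A's fully augmented per-key set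
theorem mem_augVal (n u : Int) (s : PySem.Set Int) (v : Int) :
    v ∈ pvAugVal n u s ↔ v ∈ s ∨ (u > 1 ∧ v = u - 2) ∨ (u < n - 2 ∧ v = u + 2) := by
  unfold pvAugVal
  split_ifs with h1 h2 h2 <;> simp [PySem.Set.mem_add] <;> tauto

theorem nodup_augVal (n u : Int) (s : PySem.Set Int) (hs : s.Nodup) :
    (pvAugVal n u s).Nodup := by
  unfold pvAugVal
  split_ifs <;> first
    | exact hs
    | exact PySem.Set.nodup_add _ _ hs
    | exact PySem.Set.nodup_add _ _ (PySem.Set.nodup_add _ _ hs)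

-- ---- B-side: the collected pair set ----

theorem mem_collect_step (n : Int) (s : PySem.Set (Int × Int)) (r : List Int) (u v : Int) :
    (u, v) ∈ pvCollect n s r ↔ (u, v) ∈ s ∨
      (u = PySem.List.pyGetD r 0 0 ∧
        (v = PySem.List.pyGetD r 1 0
          ∨ (PySem.List.pyGetD r 0 0 > 1 ∧ v = PySem.List.pyGetD r 0 0 - 2)
          ∨ (PySem.List.pyGetD r 0 0 < n - 2 ∧ v = PySem.List.pyGetD r 0 0 + 2))) := by
  unfold pvCollect
  simp only []
  split_ifs with h1 h2 h2 <;>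
    simp only [PySem.Set.mem_add, Prod.mk.injEq] <;> tauto

theorem mem_collect (n : Int) (roads : List (List Int)) (s : PySem.Set (Int × Int))
    (u v : Int) :
    (u, v) ∈ roads.foldl (pvCollect n) s ↔ (u, v) ∈ s ∨ pvEdgeP n roads u v := by
  induction roads generalizing s with
  | nil => simp [pvEdgeP]
  | cons r rs ih =>
    simp only [List.foldl_cons, ih, mem_collect_step, pvEdgeP, List.mem_cons,
      exists_eq_or_imp]
    exact or_assoc

theorem nodup_collect (n : Int) (roads : List (List Int)) (s : PySem.Set (Int × Int))
    (hs : s.Nodup) : (roads.foldl (pvCollect n) s).Nodup := by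
  induction roads generalizing s with
  | nil => exact hs
  | cons r rs ih =>
    simp only [List.foldl_cons]
    refine ih _ ?_
    unfold pvCollect
    simp only []
    split_ifs <;> first
      | exact PySem.Set.nodup_add _ _ (PySem.Set.nodup_add _ _ (PySem.Set.nodup_add _ _ hs))
      | exact PySem.Set.nodup_add _ _ (PySem.Set.nodup_add _ _ hs)
      | exact PySem.Set.nodup_add _ _ hs

-- for a key of the graph, B's edge predicate is exactly membership in A's augmented set
theorem edgeP_iff_mem_augVal (n : Int) (roads : List (List Int)) (u v : Int)
    (hu : ∃ r ∈ roads, u = PySem.List.pyGetD r 0 0) :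
    pvEdgeP n roads u v ↔
      v ∈ pvAugVal n u ((roads.foldl pvBuildStepA PySem.Dict.empty).getD u []) := by
  rw [mem_augVal, mem_build_getD]
  simp only [PySem.Dict.getD_empty, List.not_mem_nil, false_or]
  constructor
  · rintro ⟨r, hr, rfl, (hv | ⟨hgt, hv⟩ | ⟨hlt, hv⟩)⟩
    · exact Or.inl ⟨r, hr, rfl, hv⟩
    · exact Or.inr (Or.inl ⟨hgt, hv⟩)
    · exact Or.inr (Or.inr ⟨hlt, hv⟩)
  · rintro (⟨r, hr, rfl, hv⟩ | ⟨hgt, hv⟩ | ⟨hlt, hv⟩)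
    · exact ⟨r, hr, rfl, Or.inl hv⟩
    · obtain ⟨r, hr, rfl⟩ := hu
      exact ⟨r, hr, rfl, Or.inr (Or.inl ⟨hgt, hv⟩)⟩
    · obtain ⟨r, hr, rfl⟩ := hu
      exact ⟨r, hr, rfl, Or.inr (Or.inr ⟨hlt, hv⟩)⟩

-- ---- sup helpers (derived from the PySem foldl-max spec) ----

theorem le_pvISup (xs : List Int) (x : Int) (hx : x ∈ xs) : x ≤ pvISup xs :=
  (PySem.List.le_foldl_max xs 0).2 x hx

theorem pvISup_nonneg (xs : List Int) : 0 ≤ pvISup xs :=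
  (PySem.List.le_foldl_max xs 0).1

theorem pvISup_le (xs : List Int) (c : Int) (hc : 0 ≤ c) (h : ∀ x ∈ xs, x ≤ c) :
    pvISup xs ≤ c := by
  rcases PySem.List.foldl_max_mem xs 0 with he | hm
  · unfold pvISup; rw [he]; exact hc
  · exact h _ hm

theorem pvISup_cons (x : Int) (xs : List Int) (hx : 0 ≤ x) :
    pvISup (x :: xs) = max x (pvISup xs) := by
  apply le_antisymm
  · refine pvISup_le _ _ (le_trans hx (le_max_left _ _)) ?_
    intro y hy
    rcases List.mem_cons.mp hy with rfl | hy
    · exact le_max_left _ _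
    · exact le_trans (le_pvISup xs y hy) (le_max_right _ _)
  · refine max_le (le_pvISup _ _ List.mem_cons_self) ?_
    refine pvISup_le _ _ (pvISup_nonneg _) ?_
    intro y hy
    exact le_pvISup _ _ (List.mem_cons_of_mem _ hy)

-- ---- scan characterisation ----

theorem scan_eq_runMax (l : List (Int × Int)) (p r b : Int) (hb : r ≤ b) (hb0 : 0 ≤ b) :
    pvScan l (some p) r b = max b (pvRunMax l p r) := by
  induction l generalizing p r b with
  | nil => simp [pvScan, pvRunMax, max_eq_left hb0]
  | cons e rest ih =>
    obtain ⟨u, v⟩ := e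
    have hcond : ((some p : Option Int) = some u) = (u = p) := by
      simp [eq_comm]
    simp only [pvScan, pvRunMax, hcond]
    set r' : Int := if u = p then r + 1 else 1 with hr'
    have h1 : r' ≤ max b r' := le_max_right _ _
    have h0 : (0 : Int) ≤ max b r' := le_trans hb0 (le_max_left _ _)
    rw [ih u r' (max b r') h1 h0, max_assoc]

-- count of pairs whose source is u, as an Int
def pvCnt (l : List (Int × Int)) (u : Int) : Int :=
  (l.countP (fun e => decide (e.1 = u)) : Nat)

theorem pvCnt_cons (e : Int × Int) (l : List (Int × Int)) (u : Int) :
    pvCnt (e :: l) u = pvCnt l u + (if e.1 = u then 1 else 0) := by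
  unfold pvCnt
  rw [List.countP_cons]
  by_cases h : e.1 = u <;> simp [h]

theorem pvCnt_nonneg (l : List (Int × Int)) (u : Int) : 0 ≤ pvCnt l u := by
  unfold pvCnt; positivity

theorem pvCnt_eq_zero_of_notmem (l : List (Int × Int)) (u : Int)
    (h : u ∉ l.map Prod.fst) : pvCnt l u = 0 := by
  unfold pvCnt
  norm_cast
  rw [List.countP_eq_zero]
  intro e he
  simp only [decide_eq_true_eq]
  intro hfst
  exact h (hfst ▸ List.mem_map_of_mem he)

theorem runMax_spec (l : List (Int × Int)) (k r : Int)
    (hl : l.Pairwise (fun a b => a.1 ≤ b.1)) (hk : ∀ e ∈ l, k ≤ e.1) (hr : 1 ≤ r) :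
    pvRunMax l k r =
      pvISup ((l.map Prod.fst).map (fun u => pvCnt l u + if u = k then r else 0)) := by
  induction l generalizing k r with
  | nil => simp [pvRunMax, pvISup]
  | cons e rest ih =>
    obtain ⟨u, v⟩ := e
    have hpw : rest.Pairwise (fun a b => a.1 ≤ b.1) := (List.pairwise_cons.mp hl).2
    have hge : ∀ f ∈ rest, u ≤ f.1 := fun f hf => (List.pairwise_cons.mp hl).1 f hf
    simp only [pvRunMax]
    set r' : Int := if u = k then r + 1 else 1 with hr'def
    have hr'1 : 1 ≤ r' := by rw [hr'def]; split_ifs <;> omega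
    rw [ih u r' hpw hge hr'1]
    have hhead : pvCnt ((u, v) :: rest) u + (if u = k then r else 0) = pvCnt rest u + r' := by
      rw [pvCnt_cons, if_pos rfl, hr'def]
      by_cases h : u = k
      · rw [if_pos h, if_pos h]; omega
      · rw [if_neg h, if_neg h]; omega
    have hterms : ∀ w ∈ rest.map Prod.fst,
        pvCnt ((u, v) :: rest) w + (if w = k then r else 0)
          = pvCnt rest w + (if w = u then r' else 0) := by
      intro w hw
      obtain ⟨f, hf, rfl⟩ := List.mem_map.mp hw
      have hwu : u ≤ f.1 := hge f hf
      rw [pvCnt_cons]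
      by_cases hw2 : f.1 = u
      · rw [if_pos hw2.symm, if_pos hw2]
        by_cases hcase : u = k
        · rw [if_pos (hw2.trans hcase), hr'def, if_pos hcase]; omega
        · have hku : k < u := lt_of_le_of_ne (hk (u, v) List.mem_cons_self) (Ne.symm hcase)
          rw [if_neg (by omega : ¬ f.1 = k), hr'def, if_neg hcase]; omega
      · rw [if_neg (fun hh => hw2 hh.symm), if_neg hw2]
        have hfk : ¬ f.1 = k := by
          by_cases hcase : u = k
          · rw [← hcase]; exact hw2
          · have hku : k < u := lt_of_le_of_ne (hk (u, v) List.mem_cons_self) (Ne.symm hcase)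
            omega
        rw [if_neg hfk]; omega
    simp only [List.map_cons]
    rw [hhead, List.map_congr_left hterms,
      pvISup_cons _ _ (by have := pvCnt_nonneg rest u; omega)]
    by_cases hmem : u ∈ rest.map Prod.fst
    · have hm2 : pvCnt rest u + r' ∈
          (rest.map Prod.fst).map (fun w => pvCnt rest w + if w = u then r' else 0) := by
        refine List.mem_map.mpr ⟨u, hmem, ?_⟩
        simp
      have hle := le_pvISup _ _ hm2
      rw [max_eq_right (le_trans (le_add_of_nonneg_left (pvCnt_nonneg rest u)) hle),
        max_eq_right hle]
    · rw [pvCnt_eq_zero_of_notmem rest u hmem, zero_add]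

-- ---- the per-key count ↔ set-size bridge ----

theorem cnt_eq_length (pairs : List (Int × Int)) (t : List Int) (u : Int)
    (hp : pairs.Nodup) (ht : t.Nodup) (hbr : ∀ v : Int, (u, v) ∈ pairs ↔ v ∈ t) :
    pvCnt pairs u = (t.length : Int) := by
  unfold pvCnt
  norm_cast
  rw [List.countP_eq_length_filter]
  set F := pairs.filter (fun e => decide (e.1 = u)) with hF
  have hFnd : F.Nodup := hp.filter _
  have hmap : (F.map Prod.snd).Nodup := by
    refine List.Nodup.map_on ?_ hFnd
    intro e he e' he' hsnd
    have h1 : e.1 = u := by simpa using (List.of_mem_filter he)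
    have h2 : e'.1 = u := by simpa using (List.of_mem_filter he')
    exact Prod.ext (h1.trans h2.symm) hsnd
  have hperm : (F.map Prod.snd).Perm t := by
    rw [List.perm_ext_iff_of_nodup hmap ht]
    intro v
    constructor
    · intro hv
      obtain ⟨e, he, rfl⟩ := List.mem_map.mp hv
      have h1 : e.1 = u := by simpa using (List.of_mem_filter he)
      have h2 : e ∈ pairs := List.mem_of_mem_filter he
      exact (hbr e.2).mp (by rwa [← h1, Prod.mk.eta])
    · intro hv
      have h2 : (u, v) ∈ pairs := (hbr v).mpr hv
      exact List.mem_map.mpr ⟨(u, v), List.mem_filter.mpr ⟨h2, by simp⟩, rfl⟩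
  calc F.length = (F.map Prod.snd).length := (List.length_map _).symm
    _ = t.length := hperm.length_eq

-- ---- main equivalence ----

theorem main_eq (roads : List (List Int)) (hpre : Pre_numFlowers roads) :
    numFlowers roads = numFlowers_alt roads := by
  obtain ⟨hne, -⟩ := hpre
  have hA : numFlowers roads =
      (PySem.List.max? (((roads.foldl pvBuildStepA PySem.Dict.empty).keys.foldl
          (pvAugStep (roads.length : Int)) (roads.foldl pvBuildStepA PySem.Dict.empty)).values.map
        (fun v => PySem.Set.len v + 1)) id).getD 0 := rfl
  have hB : numFlowers_alt roads =
      pvScan (PySem.List.sorted (roads.foldl (pvCollect (roads.length : Int)) PySem.Set.empty)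
        (fun e => e.1)) none 0 0 + 1 := rfl
  rw [hA, hB]
  set n : Int := (roads.length : Int) with hn
  set graph := roads.foldl pvBuildStepA PySem.Dict.empty with hgraphdef
  set graph2 := graph.keys.foldl (pvAugStep n) graph with hg2def
  set pairs := roads.foldl (pvCollect n) PySem.Set.empty with hpairsdef
  set sp := PySem.List.sorted pairs (fun e => e.1) with hspdef
  have hndK : graph.keys.Nodup := by
    rw [hgraphdef]
    exact PySem.Dict.nodup_keys_foldl_modify_key roads (fun road => PySem.List.pyGetD road 0 0)
      [] (fun _ road => fun s => PySem.Set.add s (PySem.List.pyGetD road 1 0)) PySem.Dict.empty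
      (by simp)
  have hkeys2 : graph2.keys = graph.keys := by
    rw [hg2def]; exact augLoop_keys n graph.keys graph (fun x hx => hx)
  have hgetD2 : ∀ u ∈ graph.keys, graph2.getD u [] = pvAugVal n u (graph.getD u []) := by
    intro u hu; rw [hg2def]; exact augLoop_getD n graph.keys graph hndK u hu
  have hvals : graph2.values.map (fun v => PySem.Set.len v + 1)
      = graph.keys.map (fun u => ((pvAugVal n u (graph.getD u [])).length : Int) + 1) := by
    rw [PySem.Dict.values_eq_map_keys graph2 (by rw [hkeys2]; exact hndK) ([] : PySem.Set Int),
      hkeys2, List.map_map]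
    refine List.map_congr_left ?_
    intro u hu
    simp only [Function.comp_apply]
    rw [hgetD2 u hu]
    simp [PySem.Set.len]
  have hr0ex : ∃ r, r ∈ roads := by
    cases roads with
    | nil => exact absurd rfl hne
    | cons a l => exact ⟨a, List.mem_cons_self⟩
  obtain ⟨r0, hr0⟩ := hr0ex
  have hu0K : PySem.List.pyGetD r0 0 0 ∈ graph.keys := by
    rw [hgraphdef]; exact (mem_build_keys roads _).mpr ⟨r0, hr0, rfl⟩
  have hpnd : pairs.Nodup := by
    rw [hpairsdef]; exact nodup_collect n roads _ List.nodup_nil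
  have hmempairs : ∀ u v : Int, (u, v) ∈ pairs ↔ pvEdgeP n roads u v := by
    intro u v
    rw [hpairsdef]
    simpa using (mem_collect n roads PySem.Set.empty u v)
  have hspnd : sp.Nodup := by
    rw [hspdef]
    exact ((PySem.List.sorted_perm pairs (fun e => e.1) false).nodup_iff).mpr hpnd
  have hspmem : ∀ e : Int × Int, e ∈ sp ↔ e ∈ pairs := by
    intro e; rw [hspdef]; exact PySem.List.mem_sorted pairs (fun e => e.1) false e
  have hsppw : sp.Pairwise (fun a b => a.1 ≤ b.1) := by
    rw [hspdef]; exact PySem.List.sorted_pairwise pairs (fun e => e.1)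
  have hcntsp : ∀ u : Int, pvCnt sp u = pvCnt pairs u := by
    intro u
    unfold pvCnt
    rw [hspdef, (PySem.List.sorted_perm pairs (fun e => e.1) false).countP_eq]
  have hfst : ∀ u : Int, u ∈ sp.map Prod.fst ↔ u ∈ graph.keys := by
    intro u
    rw [hgraphdef, mem_build_keys]
    constructor
    · intro hu
      obtain ⟨e, he, rfl⟩ := List.mem_map.mp hu
      have hep : (e.1, e.2) ∈ pairs := (hspmem _).mp (by rwa [Prod.mk.eta])
      obtain ⟨r, hr, hu', -⟩ := (hmempairs _ _).mp hep
      exact ⟨r, hr, hu'⟩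
    · rintro ⟨r, hr, rfl⟩
      refine List.mem_map.mpr
        ⟨(PySem.List.pyGetD r 0 0, PySem.List.pyGetD r 1 0), ?_, rfl⟩
      exact (hspmem _).mpr ((hmempairs _ _).mpr ⟨r, hr, rfl, Or.inl rfl⟩)
  have hTnd : ∀ u : Int, (pvAugVal n u (graph.getD u [])).Nodup := by
    intro u
    refine nodup_augVal n u _ ?_
    rw [hgraphdef]
    exact nodup_build_getD roads PySem.Dict.empty (fun k => by simp) u
  have hcntlen : ∀ u ∈ graph.keys,
      pvCnt pairs u = ((pvAugVal n u (graph.getD u [])).length : Int) := by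
    intro u hu
    refine cnt_eq_length pairs _ u hpnd (hTnd u) ?_
    intro v
    rw [hmempairs u v, hgraphdef]
    refine edgeP_iff_mem_augVal n roads u v ?_
    rw [hgraphdef] at hu
    exact (mem_build_keys roads u).mp hu
  have hspne : sp ≠ [] := by
    rw [hspdef, Ne, PySem.List.sorted_eq_nil_iff]
    intro hnil
    have hmem : (PySem.List.pyGetD r0 0 0, PySem.List.pyGetD r0 1 0) ∈ pairs :=
      (hmempairs _ _).mpr ⟨r0, hr0, rfl, Or.inl rfl⟩
    rw [hnil] at hmem
    exact absurd hmem List.not_mem_nil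
  obtain ⟨e1, tl, hspcons⟩ := List.exists_cons_of_ne_nil hspne
  obtain ⟨u1, v1⟩ := e1
  have hheadle : ∀ f ∈ sp, u1 ≤ f.1 := by
    intro f hf
    rw [hspcons] at hf
    rcases List.mem_cons.mp hf with rfl | hf'
    · exact le_refl _
    · have := hsppw
      rw [hspcons] at this
      exact (List.pairwise_cons.mp this).1 f hf'
  have hscan : pvScan sp none 0 0 = pvRunMax sp (u1 - 1) 1 := by
    rw [hspcons]
    simp only [pvScan, pvRunMax]
    rw [if_neg (by simp : ¬ (none : Option Int) = some u1),
      if_neg (by omega : ¬ u1 = u1 - 1)]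
    rw [scan_eq_runMax tl u1 1 (max 0 1) (by omega) (by omega)]
    norm_num
  have hrm : pvRunMax sp (u1 - 1) 1
      = pvISup ((sp.map Prod.fst).map (fun u => pvCnt sp u)) := by
    rw [runMax_spec sp (u1 - 1) 1 hsppw
      (fun e he => by have := hheadle e he; omega) (le_refl 1)]
    refine congrArg pvISup (List.map_congr_left ?_)
    intro u hu
    have hle : u1 ≤ u := by
      obtain ⟨f, hf, rfl⟩ := List.mem_map.mp hu
      exact hheadle f hf
    rw [if_neg (by omega : ¬ u = u1 - 1), add_zero]
  have hAne : graph2.values.map (fun v => PySem.Set.len v + 1) ≠ [] := by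
    rw [hvals]
    simp only [ne_eq, List.map_eq_nil_iff]
    intro hk
    rw [hk] at hu0K
    exact absurd hu0K List.not_mem_nil
  obtain ⟨m, hm⟩ : ∃ m, PySem.List.max?
      (graph2.values.map (fun v => PySem.Set.len v + 1)) id = some m := by
    cases hmx : PySem.List.max? (graph2.values.map (fun v => PySem.Set.len v + 1)) id with
    | none => exact absurd ((PySem.List.max?_eq_none_iff _ _).mp hmx) hAne
    | some m => exact ⟨m, rfl⟩
  rw [hm, Option.getD_some, hscan, hrm]
  have hm_mem := PySem.List.max?_mem hm
  have hm_max := PySem.List.max?_isMax hm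
  rw [hvals] at hm_mem hm_max
  obtain ⟨us, husK, hmu⟩ := List.mem_map.mp hm_mem
  have hmL : ((pvAugVal n us (graph.getD us [])).length : Int)
      ∈ (sp.map Prod.fst).map (fun u => pvCnt sp u) := by
    refine List.mem_map.mpr ⟨us, (hfst us).mpr husK, ?_⟩
    rw [hcntsp, hcntlen us husK]
  have h1 : m ≤ pvISup ((sp.map Prod.fst).map (fun u => pvCnt sp u)) + 1 := by
    have := le_pvISup _ _ hmL
    omega
  have h2 : pvISup ((sp.map Prod.fst).map (fun u => pvCnt sp u)) ≤ m - 1 := by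
    refine pvISup_le _ _ ?_ ?_
    · have hnn : (0 : Int) ≤ ((pvAugVal n us (graph.getD us [])).length : Int) := by positivity
      omega
    · intro x hx
      obtain ⟨u, hu, rfl⟩ := List.mem_map.mp hx
      have huK : u ∈ graph.keys := (hfst u).mp hu
      have hxle := hm_max (((pvAugVal n u (graph.getD u [])).length : Int) + 1)
        (List.mem_map.mpr ⟨u, huK, rfl⟩)
      simp only [id] at hxle
      rw [hcntsp, hcntlen u huK]
      omega
  omega

-- ===== VERDICT (by name: the statement is the Claim_ definition above) =====
theorem numFlowers_spec : Claim_equal_numFlowers := by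
  intro roads _ hpre
  unfold Spec_numFlowers
  exact main_eq roads hpre
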